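-- pv_equiv track=rewrite | github.com/betich/comp-prog | exam preparation/grader/07/07_32★★★.py | case5
-- ===== SOURCE A (Python) =====
-- import string
--
-- def case5(p):
--     p = [x.lower() if x in string.ascii_letters else x for x in p]
--     t1 = list(string.ascii_lowercase)
--     t2 = t1[:]
--     t2.reverse()
--     for i in range(len(p) - 3):
--         try:
--             if p[i:i + 4] == t1[t1.index(p[i]):t1.index(p[i]) + 4]:
--                 return False
--         except:
--             pass
--         try:
--             if p[i:i + 4] == t2[t2.index(p[i]):t2.index(p[i]) + 4]:
--                 return False
--         except:
--             pass
--     return True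
-- ===== SOURCE B (Python) =====
-- import string
--
-- def case5(p):
--     # One forward pass keeping run-length counters; no alphabet tables, no slices.
--     asc = desc = 1
--     prev = None
--     for x in p:
--         c = ord(x.lower()) if len(x) == 1 and x in string.ascii_letters else None
--         if c is not None and prev is not None:
--             asc = asc + 1 if c == prev + 1 else 1
--             desc = desc + 1 if c == prev - 1 else 1
--             if asc == 4 or desc == 4:
--                 return False
--         else:
--             asc = desc = 1
--         prev = c
--     return True
-- ===== Notes on version B (the rewrite author's own statement) =====
-- stated objective: faster
-- what changed: A lowercases the list and then, for every window start, looks the first element up in forward/reversed alphabet tables (list.index) and compares freshly built 4-element slices; B makes a single forward pass keeping two run-length counters (ascending/descending) over per-element letter codes, with no tables, index lookups or slicing.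
import Mathlib
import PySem

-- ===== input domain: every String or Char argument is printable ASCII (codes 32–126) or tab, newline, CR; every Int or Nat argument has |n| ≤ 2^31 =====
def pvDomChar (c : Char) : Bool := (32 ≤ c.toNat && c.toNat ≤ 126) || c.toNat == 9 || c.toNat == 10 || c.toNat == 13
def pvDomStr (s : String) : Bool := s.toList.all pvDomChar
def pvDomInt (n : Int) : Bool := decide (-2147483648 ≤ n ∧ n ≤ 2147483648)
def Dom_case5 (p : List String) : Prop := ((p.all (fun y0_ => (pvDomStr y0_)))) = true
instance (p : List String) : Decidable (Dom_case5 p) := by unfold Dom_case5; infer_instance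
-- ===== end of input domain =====

-- B replaces A's alphabet tables, list.index and per-index window slicing by a single
-- forward pass over the list keeping two run-length counters (objective: faster; the timing
-- run measured B ≥ 1.5× faster than A on the generated inputs at the largest size).

-- string.ascii_letters / string.ascii_lowercase (module constants of A's file)
def pvLetters : String := "abcdefghijklmnopqrstuvwxyzABCDEFGHIJKLMNOPQRSTUVWXYZ"
def pvLowercase : String := "abcdefghijklmnopqrstuvwxyz"

-- ===== PORT A =====
-- one try-block of A: p[i] (IndexError -> pass), t.index(p[i]) (ValueError -> pass),
-- then the slice comparison p[i:i+4] == t[k:k+4]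
def case5Check (q t : List String) (i : Int) : Bool :=
  match PySem.List.pyGet? q i with
  | none => false
  | some s =>
    match PySem.List.index? t s with
    | none => false
    | some k =>
      PySem.List.slice q (some i) (some (i + 4)) ==
        PySem.List.slice t (some (k : Int)) (some ((k : Int) + 4))

-- the for-loop with its early `return False`
def case5Loop (q t1 t2 : List String) : List Int → Bool
  | [] => true
  | i :: rest =>
    if case5Check q t1 i || case5Check q t2 i then false
    else case5Loop q t1 t2 rest

def case5 (p : List String) : Bool :=
  let q := p.map (fun x => if PySem.Str.isIn x pvLetters then PySem.Str.lower x else x)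
  let t1 := pvLowercase.toList.map (fun c => String.ofList [c])
  let t2 := t1.reverse
  case5Loop q t1 t2 (PySem.List.pyRange 0 ((q.length : Int) - 3))

-- ===== PORT B =====
-- c = ord(x.lower()) if len(x) == 1 and x in string.ascii_letters else None
def case5AltCode (x : String) : Option Int :=
  if PySem.Str.len x == 1 && PySem.Str.isIn x pvLetters then
    match (PySem.Str.lower x).toList with
    | [c] => some ((c.toNat : Nat) : Int)
    | _ => none
  else none

-- the single pass with the two run-length counters and the early `return False`
def case5AltScan : List String → Option Int → Int → Int → Bool
  | [], _, _, _ => true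
  | x :: rest, prev, asc, desc =>
    match case5AltCode x, prev with
    | some c, some pv =>
      let asc' := if c == pv + 1 then asc + 1 else 1
      let desc' := if c == pv - 1 then desc + 1 else 1
      if asc' == 4 || desc' == 4 then false
      else case5AltScan rest (some c) asc' desc'
    | c, _ => case5AltScan rest c 1 1

def case5_alt (p : List String) : Bool := case5AltScan p none 1 1

-- ===== PRECONDITION & SPEC =====
def Spec_case5 (p : List String) (out : Bool) : Prop := out = case5_alt p
instance (p : List String) (out : Bool) : Decidable (Spec_case5 p out) := by unfold Spec_case5; infer_instance

-- ===== CLAIM (what is proved, stated in full; the proofs are below) =====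
def Claim_equal_case5 : Prop := ∀ (p : List String), Dom_case5 p → Spec_case5 p (case5 p)

-- ===== LEMMAS AND PROOFS =====

-- A's lowering map and the letter-code of a string (proof-side only)
def lowerA (x : String) : String :=
  if PySem.Str.isIn x pvLetters then PySem.Str.lower x else x

def code' (s : String) : Option Int :=
  match s.toList with
  | [c] => if 97 ≤ c.toNat ∧ c.toNat ≤ 122 then some ((c.toNat : Nat) : Int) else none
  | _ => none

def t1L : List String := pvLowercase.toList.map (fun c => String.ofList [c])
def fL (k : Nat) : String := String.ofList [Char.ofNat (97 + k)]
def fD (k : Nat) : String := String.ofList [Char.ofNat (122 - k)]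

def contAsc (v : Int) : Nat → List (Option Int) → Bool
  | 0, _ => true
  | k + 1, some c :: rest => (c == v + 1) && contAsc c k rest
  | _ + 1, _ => false

def contDesc (v : Int) : Nat → List (Option Int) → Bool
  | 0, _ => true
  | k + 1, some c :: rest => (c == v - 1) && contDesc c k rest
  | _ + 1, _ => false

def winHead : List (Option Int) → Bool
  | some v :: rest => contAsc v 3 rest || contDesc v 3 rest
  | _ => false

def winAny : List (Option Int) → Bool
  | [] => false
  | none :: rest => winAny rest
  | some v :: rest => contAsc v 3 rest || contDesc v 3 rest || winAny rest

def scanC : List (Option Int) → Option Int → Int → Int → Bool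
  | [], _, _, _ => true
  | c0 :: rest, prev, asc, desc =>
    match c0, prev with
    | some c, some pv =>
      let asc' := if c == pv + 1 then asc + 1 else 1
      let desc' := if c == pv - 1 then desc + 1 else 1
      if asc' == 4 || desc' == 4 then false
      else scanC rest (some c) asc' desc'
    | c, _ => scanC rest c 1 1

def pend (prev : Option Int) (a d : Int) (cs : List (Option Int)) : Bool :=
  match prev with
  | some pv => contAsc pv (4 - a).toNat cs || contDesc pv (4 - d).toNat cs
  | none => false

theorem char_toNat_ofNat {n : Nat} (h : n < 55296) : (Char.ofNat n).toNat = n := by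
  have hv : n.isValidChar := Or.inl h
  simp [Char.toNat_ofNat, hv]

theorem mem_map_range_char {c : Char} {b : Nat} (hb : b + 26 < 55296) :
    c ∈ (List.range 26).map (fun k => Char.ofNat (b + k)) ↔
      b ≤ c.toNat ∧ c.toNat < b + 26 := by
  constructor
  · rintro hmem
    simp only [List.mem_map, List.mem_range] at hmem
    obtain ⟨k, hk, rfl⟩ := hmem
    rw [char_toNat_ofNat (by omega)]
    omega
  · rintro ⟨h1, h2⟩
    simp only [List.mem_map, List.mem_range]
    refine ⟨c.toNat - b, by omega, ?_⟩
    have : b + (c.toNat - b) = c.toNat := by omega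
    rw [this, Char.ofNat_toNat]

theorem lettersChars_eq :
    pvLetters.toList =
      (List.range 26).map (fun k => Char.ofNat (97 + k)) ++
      (List.range 26).map (fun k => Char.ofNat (65 + k)) := by
  decide

theorem mem_lettersChars {c : Char} :
    c ∈ pvLetters.toList ↔
      (97 ≤ c.toNat ∧ c.toNat ≤ 122) ∨ (65 ≤ c.toNat ∧ c.toNat ≤ 90) := by
  rw [lettersChars_eq, List.mem_append, mem_map_range_char (by omega),
    mem_map_range_char (by omega)]
  omega

theorem isIn_iff_mem {x : String} (c : Char) (h : x.toList = [c]) :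
    PySem.Str.isIn x pvLetters = true ↔
      (97 ≤ c.toNat ∧ c.toNat ≤ 122) ∨ (65 ≤ c.toNat ∧ c.toNat ≤ 90) := by
  rw [PySem.Str.isIn_iff_infix, h, List.singleton_infix_iff, mem_lettersChars]

theorem lowerChar_code {c : Char} (h : (97 ≤ c.toNat ∧ c.toNat ≤ 122) ∨ (65 ≤ c.toNat ∧ c.toNat ≤ 90)) :
    97 ≤ (PySem.Chars.lowerChar c).toNat ∧ (PySem.Chars.lowerChar c).toNat ≤ 122 := by
  unfold PySem.Chars.lowerChar PySem.Chars.isupper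
  by_cases hu : ('A' ≤ c ∧ c ≤ 'Z')
  · have h1 : 65 ≤ c.toNat ∧ c.toNat ≤ 90 := by
      constructor <;> [exact hu.1; exact hu.2]
    simp only [decide_eq_true_eq, hu.1, hu.2, decide_true, Bool.and_self, if_true]
    rw [char_toNat_ofNat (by omega)]
    omega
  · have h2 : ¬ (65 ≤ c.toNat ∧ c.toNat ≤ 90) := fun hh => hu ⟨hh.1, hh.2⟩
    have h3 : 97 ≤ c.toNat ∧ c.toNat ≤ 122 := by tauto
    have : (decide ('A' ≤ c) && decide (c ≤ 'Z')) = false := by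
      rcases Decidable.em ('A' ≤ c) with ha | ha
      · have : ¬ (c ≤ 'Z') := fun hz => hu ⟨ha, hz⟩
        simp [this]
      · simp [ha]
    rw [this]
    simpa using h3

theorem code_eq (x : String) : case5AltCode x = code' (lowerA x) := by
  unfold case5AltCode lowerA
  have hinC : PySem.Str.isIn x pvLetters = PySem.Chars.isIn x.toList pvLetters.toList := by
    simp [PySem.Str.isIn_eq]
  by_cases hin : PySem.Str.isIn x pvLetters = true
  · have hin2 := hinC ▸ hin
    rcases hl : x.toList with _ | ⟨c, _ | ⟨c2, t⟩⟩ <;> rw [hl] at hin2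
    · have hx : (PySem.Str.len x == 1) = false := by
        simp [PySem.Str.len, hl]
      simp [hin2, hx, code', PySem.Str.toList_lower, PySem.Chars.lower, hl]
    · have hx : (PySem.Str.len x == 1) = true := by
        simp [PySem.Str.len, hl]
      have hc := (isIn_iff_mem c hl).mp hin
      have hlc := lowerChar_code hc
      simp [hin2, hx, code', PySem.Str.toList_lower, PySem.Chars.lower, hl, hlc.1, hlc.2]
    · have hx : (PySem.Str.len x == 1) = false := by
        simp [PySem.Str.len, hl]
        omega
      simp [hin2, hx, code', PySem.Str.toList_lower, PySem.Chars.lower, hl]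
  · have hin' : PySem.Str.isIn x pvLetters = false := by simpa using hin
    have hin2 := hinC ▸ hin'
    rcases hl : x.toList with _ | ⟨c, _ | ⟨c2, t⟩⟩ <;> rw [hl] at hin2
    · simp [hin', hin2, code', hl]
    · by_cases hc : 97 ≤ c.toNat ∧ c.toNat ≤ 122
      · exact absurd ((isIn_iff_mem c hl).mpr (Or.inl hc)) (by rw [hinC, hl, hin2]; simp)
      · simp [hin', hin2, code', hl, hc]
    · simp [hin', hin2, code', hl]

theorem contAsc_mono {v : Int} {k k' : Nat} {cs : List (Option Int)} (h : k' ≤ k)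
    (hk : contAsc v k cs = true) : contAsc v k' cs = true := by
  induction k generalizing v k' cs with
  | zero => interval_cases k' ; exact hk
  | succ n ih =>
    rcases k' with _ | k'
    · rfl
    · rcases cs with _ | ⟨_ | c, rest⟩
      · simp [contAsc] at hk
      · simp [contAsc] at hk
      · simp only [contAsc, Bool.and_eq_true] at hk ⊢
        exact ⟨hk.1, ih (by omega) hk.2⟩

theorem contDesc_mono {v : Int} {k k' : Nat} {cs : List (Option Int)} (h : k' ≤ k)
    (hk : contDesc v k cs = true) : contDesc v k' cs = true := by
  induction k generalizing v k' cs with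
  | zero => interval_cases k' ; exact hk
  | succ n ih =>
    rcases k' with _ | k'
    · rfl
    · rcases cs with _ | ⟨_ | c, rest⟩
      · simp [contDesc] at hk
      · simp [contDesc] at hk
      · simp only [contDesc, Bool.and_eq_true] at hk ⊢
        exact ⟨hk.1, ih (by omega) hk.2⟩

theorem scanC_eq (cs : List (Option Int)) : ∀ (prev : Option Int) (a d : Int),
    1 ≤ a → a ≤ 3 → 1 ≤ d → d ≤ 3 →
    scanC cs prev a d = !(winAny cs || pend prev a d cs) := by
  induction cs with
  | nil =>
    rintro (_ | pv) a d h1 h2 h3 h4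
    · rfl
    · obtain ⟨m, hm⟩ : ∃ m, (4 - a).toNat = m + 1 := ⟨(3 - a).toNat, by omega⟩
      obtain ⟨m', hm'⟩ : ∃ m', (4 - d).toNat = m' + 1 := ⟨(3 - d).toNat, by omega⟩
      simp [scanC, winAny, pend, hm, hm', contAsc, contDesc]
  | cons c0 rest ih =>
    rintro (_ | pv) a d h1 h2 h3 h4
    · -- prev = none
      rcases c0 with _ | cv
      · rw [show scanC (none :: rest) none a d = scanC rest none 1 1 from rfl,
          ih none 1 1 (by omega) (by omega) (by omega) (by omega)]
        simp [winAny, pend]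
      · rw [show scanC (some cv :: rest) none a d = scanC rest (some cv) 1 1 from rfl,
          ih (some cv) 1 1 (by omega) (by omega) (by omega) (by omega)]
        simp only [winAny, pend]
        cases hw : winAny rest <;> cases ha' : contAsc cv 3 rest <;> cases hd' : contDesc cv 3 rest <;> simp [hw, ha', hd']
    · -- prev = some pv
      obtain ⟨m, hm⟩ : ∃ m, (4 - a).toNat = m + 1 := ⟨(3 - a).toNat, by omega⟩
      obtain ⟨m', hm'⟩ : ∃ m', (4 - d).toNat = m' + 1 := ⟨(3 - d).toNat, by omega⟩
      rcases c0 with _ | cv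
      · rw [show scanC (none :: rest) (some pv) a d = scanC rest none 1 1 from rfl,
          ih none 1 1 (by omega) (by omega) (by omega) (by omega)]
        simp [winAny, pend, hm, hm', contAsc, contDesc]
      · by_cases hA : cv = pv + 1
        · have hD : ¬ cv = pv - 1 := by omega
          by_cases ha3 : a = 3
          · have : scanC (some cv :: rest) (some pv) a d = false := by
              simp [scanC, hA, hD, ha3]
            rw [this]
            have hca : contAsc pv (4 - a).toNat (some cv :: rest) = true := by
              rw [hm]
              have hm0 : m = 0 := by omega
              simp [hm0, contAsc, hA]
            simp [pend, hca]
          · have hstep : scanC (some cv :: rest) (some pv) a d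
                = scanC rest (some cv) (a + 1) 1 := by
              simp only [scanC, hA]
              have : ((pv + 1 : Int) == pv - 1) = false := by simp; omega
              rw [this]
              have h4' : ((a + 1 : Int) == 4) = false := by simp; omega
              simp [h4', if_neg]
            rw [hstep, ih (some cv) (a + 1) 1 (by omega) (by omega) (by omega) (by omega)]
            have e1 : pend (some pv) a d (some cv :: rest)
                = contAsc cv (3 - a).toNat rest := by
              simp only [pend, hm, hm', contAsc, contDesc, hA]
              have : ((pv + 1 : Int) == pv - 1) = false := by simp; omega
              rw [this]
              have : m = (3 - a).toNat := by omega
              simp [this]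
            have e2 : pend (some cv) (a + 1) 1 rest
                = (contAsc cv (3 - a).toNat rest || contDesc cv 3 rest) := by
              simp only [pend]
              congr 1 <;> congr 1 <;> omega
            rw [e1, e2]
            simp only [winAny]
            have himp : contAsc cv 3 rest = true → contAsc cv (3 - a).toNat rest = true :=
              fun h => contAsc_mono (by omega) h
            clear ih hstep e1 e2
            cases hw : winAny rest <;>
            cases h3a : contAsc cv 3 rest <;>
            cases hka : contAsc cv (3 - a).toNat rest <;>
            cases h3d : contDesc cv 3 rest <;>
            simp_all
        · by_cases hD : cv = pv - 1
          · have hA' : ((cv : Int) == pv + 1) = false := by simp [hA]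
            have hD' : ((cv : Int) == pv - 1) = true := by simp [hD]
            by_cases hd3 : d = 3
            · have hfour : ((d + 1 : Int) == 4) = true := by simp; omega
              have hsc : scanC (some cv :: rest) (some pv) a d = false := by
                simp [scanC, hA', hD', hfour]
              rw [hsc]
              have hcd : contDesc pv (4 - d).toNat (some cv :: rest) = true := by
                rw [hm']
                have hm0 : m' = 0 := by omega
                simp [hm0, contDesc, hD']
              simp [pend, hcd]
            · have h4' : ((d + 1 : Int) == 4) = false := by simp; omega
              have hstep : scanC (some cv :: rest) (some pv) a d
                  = scanC rest (some cv) 1 (d + 1) := by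
                simp [scanC, hA', hD', h4']
              rw [hstep, ih (some cv) 1 (d + 1) (by omega) (by omega) (by omega) (by omega)]
              have e1 : pend (some pv) a d (some cv :: rest)
                  = contDesc cv (3 - d).toNat rest := by
                simp only [pend, hm, hm', contAsc, contDesc, hA', hD']
                have : m' = (3 - d).toNat := by omega
                simp [this]
              have e2 : pend (some cv) 1 (d + 1) rest
                  = (contAsc cv 3 rest || contDesc cv (3 - d).toNat rest) := by
                simp only [pend]
                congr 1 <;> congr 1 <;> omega
              rw [e1, e2]
              simp only [winAny]
              have himp : contDesc cv 3 rest = true → contDesc cv (3 - d).toNat rest = true :=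
                fun h => contDesc_mono (by omega) h
              clear ih hstep e1 e2
              cases hw : winAny rest <;>
              cases h3a : contAsc cv 3 rest <;>
              cases h3d : contDesc cv 3 rest <;>
              cases hkd : contDesc cv (3 - d).toNat rest <;>
              simp_all
          · have hstep : scanC (some cv :: rest) (some pv) a d
                = scanC rest (some cv) 1 1 := by
              have hA' : ((cv : Int) == pv + 1) = false := by simp [hA]
              have hD' : ((cv : Int) == pv - 1) = false := by simp [hD]
              simp [scanC, hA', hD']
            rw [hstep, ih (some cv) 1 1 (by omega) (by omega) (by omega) (by omega)]
            have e1 : pend (some pv) a d (some cv :: rest) = false := by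
              have hA' : ((cv : Int) == pv + 1) = false := by simp [hA]
              have hD' : ((cv : Int) == pv - 1) = false := by simp [hD]
              simp [pend, hm, hm', contAsc, contDesc, hA', hD']
            have e2 : pend (some cv) 1 1 rest
                = (contAsc cv 3 rest || contDesc cv 3 rest) := by
              simp only [pend]
              congr 1 <;> congr 1 <;> omega
            rw [e1, e2]
            simp only [winAny]
            cases hw : winAny rest <;> cases ha' : contAsc cv 3 rest <;> cases hd' : contDesc cv 3 rest <;> simp [hw, ha', hd']

theorem t1rep : t1L = (List.range 26).map fL := by decide
theorem t2rep : t1L.reverse = (List.range 26).map fD := by decide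
theorem t1len : t1L.length = 26 := by decide
theorem t2len : t1L.reverse.length = 26 := by decide

theorem code'_ofNat {n : Nat} (h1 : 97 ≤ n) (h2 : n ≤ 122) :
    code' (String.ofList [Char.ofNat n]) = some (n : Int) := by
  unfold code'
  rw [String.toList_ofList]
  have ht : (Char.ofNat n).toNat = n := char_toNat_ofNat (by omega)
  simp [ht, h1, h2]

theorem code'_eq_iff {n : Nat} (h1 : 97 ≤ n) (h2 : n ≤ 122) (s : String) :
    code' s = some (n : Int) ↔ s = String.ofList [Char.ofNat n] := by
  constructor
  · intro h
    unfold code' at h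
    rcases hl : s.toList with _ | ⟨c, _ | ⟨c2, t⟩⟩ <;> rw [hl] at h
    · simp at h
    · have h' : (if 97 ≤ c.toNat ∧ c.toNat ≤ 122 then some ((c.toNat : Nat) : Int) else none) = some (n : Int) := h
      by_cases hc : 97 ≤ c.toNat ∧ c.toNat ≤ 122
      · rw [if_pos hc] at h'
        have hcn : c.toNat = n := by
          have := Option.some.inj h'
          omega
        rw [← hcn, Char.ofNat_toNat, ← hl, String.ofList_toList]
      · rw [if_neg hc] at h'
        exact absurd h' (by simp)
    · simp at h
  · intro h
    rw [h]
    exact code'_ofNat h1 h2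

theorem code'_le {s : String} {v : Int} (h : code' s = some v) :
    97 ≤ v ∧ v ≤ 122 := by
  unfold code' at h
  rcases hl : s.toList with _ | ⟨c, _ | ⟨c2, t⟩⟩ <;> rw [hl] at h
  · simp at h
  · have h' : (if 97 ≤ c.toNat ∧ c.toNat ≤ 122 then some ((c.toNat : Nat) : Int) else none) = some v := h
    by_cases hc : 97 ≤ c.toNat ∧ c.toNat ≤ 122
    · rw [if_pos hc] at h'
      have := Option.some.inj h'
      omega
    · rw [if_neg hc] at h'
      exact absurd h' (by simp)
  · simp at h

theorem mem_t1_of_code {s : String} {v : Int} (h : code' s = some v) : s ∈ t1L := by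
  obtain ⟨h1, h2⟩ := code'_le h
  have hv0 : (0 : Int) ≤ v := by omega
  have hv : v = ((v.toNat : Nat) : Int) := (Int.toNat_of_nonneg hv0).symm
  rw [hv] at h
  rw [(code'_eq_iff (n := v.toNat) (by omega) (by omega) s).mp h, t1rep]
  simp only [List.mem_map, List.mem_range]
  refine ⟨v.toNat - 97, by omega, ?_⟩
  unfold fL
  have hn : 97 + (v.toNat - 97) = v.toNat := by omega
  rw [hn]

theorem mem_t2_of_code {s : String} {v : Int} (h : code' s = some v) : s ∈ t1L.reverse := by
  rw [List.mem_reverse]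
  exact mem_t1_of_code h

theorem slice_q4 (q : List String) (j : Nat) (hj : j + 4 ≤ q.length) :
    PySem.List.slice q (some (j : Int)) (some ((j : Int) + 4)) =
      [q[j], q[j+1], q[j+2], q[j+3]] := by
  have h4 : ((j : Int) + 4) = ((j : Int) + ((4 : Nat) : Int)) := by norm_num
  rw [h4, PySem.List.slice_natCast_add,
    List.drop_eq_getElem_cons (show j < q.length by omega),
    List.drop_eq_getElem_cons (show j + 1 < q.length by omega),
    List.drop_eq_getElem_cons (show j + 1 + 1 < q.length by omega),
    List.drop_eq_getElem_cons (show j + 1 + 1 + 1 < q.length by omega)]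
  rfl

theorem take_drop_fL {k : Nat} (hk : k ≤ 22) :
    List.take 4 (List.drop k ((List.range 26).map fL)) = [fL k, fL (k+1), fL (k+2), fL (k+3)] := by
  interval_cases k <;> rfl

theorem take_drop_fD {k : Nat} (hk : k ≤ 22) :
    List.take 4 (List.drop k ((List.range 26).map fD)) = [fD k, fD (k+1), fD (k+2), fD (k+3)] := by
  interval_cases k <;> rfl

theorem slice_t1 {k : Nat} (hk : k ≤ 22) :
    PySem.List.slice t1L (some (k : Int)) (some ((k : Int) + 4)) =
      [fL k, fL (k+1), fL (k+2), fL (k+3)] := by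
  have h4 : ((k : Int) + 4) = ((k : Int) + ((4 : Nat) : Int)) := by norm_num
  rw [h4, PySem.List.slice_natCast_add, t1rep, take_drop_fL hk]

theorem slice_t2 {k : Nat} (hk : k ≤ 22) :
    PySem.List.slice t1L.reverse (some (k : Int)) (some ((k : Int) + 4)) =
      [fD k, fD (k+1), fD (k+2), fD (k+3)] := by
  have h4 : ((k : Int) + 4) = ((k : Int) + ((4 : Nat) : Int)) := by norm_num
  rw [h4, PySem.List.slice_natCast_add, t2rep, take_drop_fD hk]

theorem slice_t1_len {k : Nat} (hk : k < 26) :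
    (PySem.List.slice t1L (some (k : Int)) (some ((k : Int) + 4))).length = min 4 (26 - k) := by
  have h4 : ((k : Int) + 4) = ((k : Int) + ((4 : Nat) : Int)) := by norm_num
  rw [h4, PySem.List.slice_natCast_add]
  simp only [List.length_take, List.length_drop, t1len]

theorem slice_t2_len {k : Nat} (hk : k < 26) :
    (PySem.List.slice t1L.reverse (some (k : Int)) (some ((k : Int) + 4))).length = min 4 (26 - k) := by
  have h4 : ((k : Int) + 4) = ((k : Int) + ((4 : Nat) : Int)) := by norm_num
  rw [h4, PySem.List.slice_natCast_add]
  simp only [List.length_take, List.length_drop, List.length_reverse, t1len]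


theorem eq_fL_iff {s : String} {m : Nat} (hm : m ≤ 25) :
    s = fL m ↔ code' s = some ((97 + m : Nat) : Int) := by
  rw [code'_eq_iff (by omega) (by omega) s]
  exact Iff.rfl

theorem eq_fD_iff {s : String} {m : Nat} (hm : m ≤ 25) :
    s = fD m ↔ code' s = some ((122 - m : Nat) : Int) := by
  rw [code'_eq_iff (by omega) (by omega) s]
  unfold fD
  constructor <;> intro h <;> rw [h] <;> congr 2 <;> omega

theorem checkA_t1 (q : List String) (j : Nat) (hj : j + 4 ≤ q.length) :
    (case5Check q t1L (j : Int) = true ↔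
      ∃ v, code' (q[j]'(by omega)) = some v ∧
        code' (q[j+1]'(by omega)) = some (v+1) ∧
        code' (q[j+2]'(by omega)) = some (v+2) ∧
        code' (q[j+3]'(by omega)) = some (v+3)) := by
  unfold case5Check
  rw [PySem.List.pyGet?_natCast, List.getElem?_eq_getElem (by omega)]
  cases hidx : PySem.List.index? t1L (q[j]'(by omega)) with
  | none =>
    simp only [hidx]
    constructor
    · intro h; exact absurd h (by simp)
    · rintro ⟨v, h0, -⟩
      exact absurd (mem_t1_of_code h0)
        (by simpa using (PySem.List.index?_eq_none_iff t1L _).mp hidx)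
  | some k =>
    simp only [hidx]
    obtain ⟨hk, hqk, -⟩ := PySem.List.getElem_of_index?_eq_some hidx
    have hk26 : k < 26 := by rw [t1len] at hk; exact hk
    have hx0 : q[j]'(by omega) = fL k := by
      rw [← hqk]
      simp only [t1rep, List.getElem_map, List.getElem_range]
    by_cases hk22 : k ≤ 22
    · rw [slice_q4 q j hj, slice_t1 hk22]
      simp only [beq_iff_eq, List.cons.injEq, and_true, decide_eq_true_eq]
      constructor
      · rintro ⟨e0, e1, e2, e3⟩
        refine ⟨((97 + k : Nat) : Int), (eq_fL_iff (by omega)).mp e0, ?_, ?_, ?_⟩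
        · exact ((eq_fL_iff (m := k+1) (by omega)).mp e1).trans (by congr 1 <;> (try (push_cast; omega)))
        · exact ((eq_fL_iff (m := k+2) (by omega)).mp e2).trans (by congr 1 <;> (try (push_cast; omega)))
        · exact ((eq_fL_iff (m := k+3) (by omega)).mp e3).trans (by congr 1 <;> (try (push_cast; omega)))
      · rintro ⟨v, h0, h1, h2, h3⟩
        have hv : v = ((97 + k : Nat) : Int) := by
          have := (eq_fL_iff (m := k) (by omega)).mp hx0
          rw [h0] at this
          exact Option.some.inj this
        refine ⟨hx0, ?_, ?_, ?_⟩
        · exact (eq_fL_iff (m := k+1) (by omega)).mpr (h1.trans (by rw [hv]; congr 1 <;> (try (push_cast; omega))))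
        · exact (eq_fL_iff (m := k+2) (by omega)).mpr (h2.trans (by rw [hv]; congr 1 <;> (try (push_cast; omega))))
        · exact (eq_fL_iff (m := k+3) (by omega)).mpr (h3.trans (by rw [hv]; congr 1 <;> (try (push_cast; omega))))
    · have hne : (PySem.List.slice q (some (j : Int)) (some ((j : Int) + 4)) ==
          PySem.List.slice t1L (some (k : Int)) (some ((k : Int) + 4))) = false := by
        rw [beq_eq_false_iff_ne]
        intro he
        have := congrArg List.length he
        rw [slice_q4 q j hj, slice_t1_len hk26] at this
        simp at this
        omega
      rw [hne]
      constructor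
      · intro h; exact absurd h (by simp)
      · rintro ⟨v, h0, h1, h2, h3⟩
        have hv : v = ((97 + k : Nat) : Int) := by
          have := (eq_fL_iff (m := k) (by omega)).mp hx0
          rw [h0] at this
          exact Option.some.inj this
        have := code'_le h3
        omega

theorem checkA_t2 (q : List String) (j : Nat) (hj : j + 4 ≤ q.length) :
    (case5Check q t1L.reverse (j : Int) = true ↔
      ∃ v, code' (q[j]'(by omega)) = some v ∧
        code' (q[j+1]'(by omega)) = some (v-1) ∧
        code' (q[j+2]'(by omega)) = some (v-2) ∧
        code' (q[j+3]'(by omega)) = some (v-3)) := by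
  unfold case5Check
  rw [PySem.List.pyGet?_natCast, List.getElem?_eq_getElem (by omega)]
  cases hidx : PySem.List.index? t1L.reverse (q[j]'(by omega)) with
  | none =>
    simp only [hidx]
    constructor
    · intro h; exact absurd h (by simp)
    · rintro ⟨v, h0, -⟩
      exact absurd (mem_t2_of_code h0)
        (by simpa using (PySem.List.index?_eq_none_iff t1L.reverse _).mp hidx)
  | some k =>
    simp only [hidx]
    obtain ⟨hk, hqk, -⟩ := PySem.List.getElem_of_index?_eq_some hidx
    have hk26 : k < 26 := by rw [t2len] at hk; exact hk
    have hx0 : q[j]'(by omega) = fD k := by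
      rw [← hqk]
      simp only [t2rep, List.getElem_map, List.getElem_range]
    by_cases hk22 : k ≤ 22
    · rw [slice_q4 q j hj, slice_t2 hk22]
      simp only [beq_iff_eq, List.cons.injEq, and_true]
      constructor
      · rintro ⟨e0, e1, e2, e3⟩
        refine ⟨((122 - k : Nat) : Int), (eq_fD_iff (by omega)).mp e0, ?_, ?_, ?_⟩
        · exact ((eq_fD_iff (m := k+1) (by omega)).mp e1).trans (by congr 1 <;> (try (push_cast; omega)))
        · exact ((eq_fD_iff (m := k+2) (by omega)).mp e2).trans (by congr 1 <;> (try (push_cast; omega)))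
        · exact ((eq_fD_iff (m := k+3) (by omega)).mp e3).trans (by congr 1 <;> (try (push_cast; omega)))
      · rintro ⟨v, h0, h1, h2, h3⟩
        have hv : v = ((122 - k : Nat) : Int) := by
          have := (eq_fD_iff (m := k) (by omega)).mp hx0
          rw [h0] at this
          exact Option.some.inj this
        refine ⟨hx0, ?_, ?_, ?_⟩
        · exact (eq_fD_iff (m := k+1) (by omega)).mpr (h1.trans (by rw [hv]; congr 1 <;> (try (push_cast; omega))))
        · exact (eq_fD_iff (m := k+2) (by omega)).mpr (h2.trans (by rw [hv]; congr 1 <;> (try (push_cast; omega))))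
        · exact (eq_fD_iff (m := k+3) (by omega)).mpr (h3.trans (by rw [hv]; congr 1 <;> (try (push_cast; omega))))
    · have hne : (PySem.List.slice q (some (j : Int)) (some ((j : Int) + 4)) ==
          PySem.List.slice t1L.reverse (some (k : Int)) (some ((k : Int) + 4))) = false := by
        rw [beq_eq_false_iff_ne]
        intro he
        have := congrArg List.length he
        rw [slice_q4 q j hj, slice_t2_len hk26] at this
        simp at this
        omega
      rw [hne]
      constructor
      · intro h; exact absurd h (by simp)
      · rintro ⟨v, h0, h1, h2, h3⟩
        have hv : v = ((122 - k : Nat) : Int) := by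
          have := (eq_fD_iff (m := k) (by omega)).mp hx0
          rw [h0] at this
          exact Option.some.inj this
        have := code'_le h3
        omega

-- drop j q exposed as four getElems
theorem drop_four (q : List String) (j : Nat) (hj : j + 4 ≤ q.length) :
    q.drop j = q[j]'(by omega) :: q[j+1]'(by omega) :: q[j+2]'(by omega) ::
      q[j+3]'(by omega) :: q.drop (j+4) := by
  rw [List.drop_eq_getElem_cons (show j < q.length by omega),
    List.drop_eq_getElem_cons (show j + 1 < q.length by omega),
    List.drop_eq_getElem_cons (show j + 1 + 1 < q.length by omega),
    List.drop_eq_getElem_cons (show j + 1 + 1 + 1 < q.length by omega)]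

theorem winHead_codes (q : List String) (j : Nat) (hj : j + 4 ≤ q.length) :
    (winHead ((q.map code').drop j) = true ↔
      (∃ v, code' (q[j]'(by omega)) = some v ∧
        code' (q[j+1]'(by omega)) = some (v+1) ∧
        code' (q[j+2]'(by omega)) = some (v+2) ∧
        code' (q[j+3]'(by omega)) = some (v+3)) ∨
      (∃ v, code' (q[j]'(by omega)) = some v ∧
        code' (q[j+1]'(by omega)) = some (v-1) ∧
        code' (q[j+2]'(by omega)) = some (v-2) ∧
        code' (q[j+3]'(by omega)) = some (v-3))) := by
  rw [← List.map_drop, drop_four q j hj]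
  simp only [List.map_cons]
  cases h0 : code' (q[j]'(by omega)) with
  | none => simp [winHead]
  | some v =>
    cases h1 : code' (q[j+1]'(by omega)) with
    | none => simp [winHead, contAsc, contDesc]
    | some w1 =>
      cases h2 : code' (q[j+2]'(by omega)) with
      | none =>
        simp only [winHead, contAsc, contDesc]
        constructor
        · intro h
          simp at h
        · rintro (⟨v', hv', a1, a2, a3⟩ | ⟨v', hv', a1, a2, a3⟩) <;> simp_all
      | some w2 =>
        cases h3 : code' (q[j+3]'(by omega)) with
        | none =>
          simp only [winHead, contAsc, contDesc]
          constructor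
          · intro h
            simp at h
          · rintro (⟨v', hv', a1, a2, a3⟩ | ⟨v', hv', a1, a2, a3⟩) <;> simp_all
        | some w3 =>
          simp only [winHead, contAsc, contDesc, Bool.and_true, Bool.or_eq_true,
            Bool.and_eq_true, beq_iff_eq]
          constructor
          · rintro (⟨e1, e2, e3⟩ | ⟨e1, e2, e3⟩)
            · exact Or.inl ⟨v, rfl, congrArg some (by omega),
                congrArg some (by omega), congrArg some (by omega)⟩
            · exact Or.inr ⟨v, rfl, congrArg some (by omega),
                congrArg some (by omega), congrArg some (by omega)⟩
          · rintro (⟨v', hv', a1, a2, a3⟩ | ⟨v', hv', a1, a2, a3⟩) <;>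
            · have e0 := Option.some.inj hv'
              have i1 := Option.some.inj a1
              have i2 := Option.some.inj a2
              have i3 := Option.some.inj a3
              first
              | exact Or.inl (by omega)
              | exact Or.inr (by omega)

theorem winAny_cons (c : Option Int) (t : List (Option Int)) :
    winAny (c :: t) = (winHead (c :: t) || winAny t) := by
  cases c <;> simp [winAny, winHead]

theorem winAny_iff (cs : List (Option Int)) :
    winAny cs = true ↔ ∃ j, winHead (cs.drop j) = true := by
  induction cs with
  | nil =>
    simp only [winAny]
    constructor
    · intro h; exact absurd h (by simp)
    · rintro ⟨j, hj⟩
      rw [List.drop_nil] at hj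
      exact absurd hj (by simp [winHead])
  | cons c t ih =>
    rw [winAny_cons]
    constructor
    · intro h
      rcases Bool.or_eq_true_iff.mp h with h | h
      · exact ⟨0, h⟩
      · obtain ⟨j, hj⟩ := ih.mp h
        exact ⟨j + 1, by rwa [List.drop_succ_cons]⟩
    · rintro ⟨j, hj⟩
      cases j with
      | zero => exact Bool.or_eq_true_iff.mpr (Or.inl hj)
      | succ j =>
        rw [List.drop_succ_cons] at hj
        exact Bool.or_eq_true_iff.mpr (Or.inr (ih.mpr ⟨j, hj⟩))

theorem contAsc_len {v : Int} {k : Nat} {cs : List (Option Int)}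
    (h : contAsc v k cs = true) : k ≤ cs.length := by
  induction k generalizing v cs with
  | zero => omega
  | succ n ih =>
    rcases cs with _ | ⟨_ | c, rest⟩
    · exact absurd h (by simp [contAsc])
    · exact absurd h (by simp [contAsc])
    · simp only [contAsc, Bool.and_eq_true] at h
      have := ih h.2
      simp
      omega

theorem contDesc_len {v : Int} {k : Nat} {cs : List (Option Int)}
    (h : contDesc v k cs = true) : k ≤ cs.length := by
  induction k generalizing v cs with
  | zero => omega
  | succ n ih =>
    rcases cs with _ | ⟨_ | c, rest⟩
    · exact absurd h (by simp [contDesc])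
    · exact absurd h (by simp [contDesc])
    · simp only [contDesc, Bool.and_eq_true] at h
      have := ih h.2
      simp
      omega

theorem winHead_len {cs : List (Option Int)} {j : Nat}
    (h : winHead (cs.drop j) = true) : j + 4 ≤ cs.length := by
  rcases hd : cs.drop j with _ | ⟨_ | v, rest⟩ <;> rw [hd] at h
  · exact absurd h (by simp [winHead])
  · exact absurd h (by simp [winHead])
  · have hlen := congrArg List.length hd
    rw [List.length_drop] at hlen
    simp only [List.length_cons] at hlen
    have hr : 3 ≤ rest.length := by
      simp only [winHead, Bool.or_eq_true] at h
      rcases h with h | h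
      · exact contAsc_len h
      · exact contDesc_len h
    omega

theorem loop_false_iff (q t1 t2 : List String) (l : List Int) :
    case5Loop q t1 t2 l = false ↔
      ∃ i ∈ l, (case5Check q t1 i || case5Check q t2 i) = true := by
  induction l with
  | nil => simp [case5Loop]
  | cons i rest ih =>
    by_cases h : (case5Check q t1 i || case5Check q t2 i) = true
    · simp only [case5Loop, h, if_true]
      constructor
      · intro _
        exact ⟨i, List.mem_cons_self, h⟩
      · intro _
        trivial
    · rw [show case5Loop q t1 t2 (i :: rest) = case5Loop q t1 t2 rest by
        simp [case5Loop, h]]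
      rw [ih]
      constructor
      · rintro ⟨x, hx, hc⟩; exact ⟨x, List.mem_cons_of_mem i hx, hc⟩
      · rintro ⟨x, hx, hc⟩
        rcases List.mem_cons.mp hx with rfl | hx
        · exact absurd hc h
        · exact ⟨x, hx, hc⟩

theorem case5_eq_winAny (p : List String) :
    case5 p = !winAny ((p.map lowerA).map code') := by
  have hq : (p.map (fun x => if PySem.Str.isIn x pvLetters then PySem.Str.lower x else x))
      = p.map lowerA := rfl
  show case5Loop (p.map lowerA) t1L t1L.reverse
      (PySem.List.pyRange 0 (((p.map lowerA).length : Int) - 3))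
    = !winAny ((p.map lowerA).map code')
  set q := p.map lowerA with hqdef
  set cs := q.map code' with hcs
  have hlen : cs.length = q.length := by simp [hcs]
  cases hw : winAny cs with
  | true =>
    obtain ⟨j, hWH⟩ := (winAny_iff cs).mp hw
    have hj4 : j + 4 ≤ q.length := by
      have := winHead_len hWH
      omega
    have hcheck := (winHead_codes q j hj4).mp (by rwa [← hcs])
    have : (case5Check q t1L (j : Int) || case5Check q t1L.reverse (j : Int)) = true := by
      rcases hcheck with h | h
      · exact Bool.or_eq_true_iff.mpr (Or.inl ((checkA_t1 q j hj4).mpr h))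
      · exact Bool.or_eq_true_iff.mpr (Or.inr ((checkA_t2 q j hj4).mpr h))
    have hmem : (j : Int) ∈ PySem.List.pyRange 0 ((q.length : Int) - 3) := by
      rw [PySem.List.mem_pyRange_one]
      omega
    rw [(loop_false_iff q t1L t1L.reverse _).mpr ⟨(j : Int), hmem, this⟩]
    rfl
  | false =>
    rcases hl : case5Loop q t1L t1L.reverse (PySem.List.pyRange 0 ((q.length : Int) - 3)) with _ | _
    · exfalso
      obtain ⟨i, hmem, hc⟩ := (loop_false_iff q t1L t1L.reverse _).mp hl
      rw [PySem.List.mem_pyRange_one] at hmem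
      obtain ⟨hi0, hiu⟩ := hmem
      have hj : i = ((i.toNat : Nat) : Int) := (Int.toNat_of_nonneg hi0).symm
      set j := i.toNat with hjdef
      have hj4 : j + 4 ≤ q.length := by omega
      rw [hj] at hc
      have hcheck : winHead (cs.drop j) = true := by
        rw [hcs]
        refine (winHead_codes q j hj4).mpr ?_
        rcases Bool.or_eq_true_iff.mp hc with h | h
        · exact Or.inl ((checkA_t1 q j hj4).mp h)
        · exact Or.inr ((checkA_t2 q j hj4).mp h)
      rw [(winAny_iff cs).mpr ⟨j, hcheck⟩] at hw
      exact Bool.true_eq_false.mp hw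
    · rfl

theorem altScan_eq (xs : List String) : ∀ (prev : Option Int) (a d : Int),
    case5AltScan xs prev a d = scanC (xs.map case5AltCode) prev a d := by
  induction xs with
  | nil => intro prev a d; rfl
  | cons x rest ih =>
    intro prev a d
    simp only [case5AltScan, List.map_cons, scanC]
    cases case5AltCode x <;> cases prev <;> simp only [ih] <;> rfl

theorem case5_alt_eq (p : List String) :
    case5_alt p = !winAny ((p.map lowerA).map code') := by
  show case5AltScan p none 1 1 = _
  rw [altScan_eq, scanC_eq _ none 1 1 (by omega) (by omega) (by omega) (by omega)]
  have hmap : p.map case5AltCode = (p.map lowerA).map code' := by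
    rw [List.map_map]
    exact List.map_congr_left (fun x _ => code_eq x)
  rw [hmap]
  simp [pend]

-- ===== VERDICT (by name: the statement is the Claim_ definition above) =====
theorem case5_spec : Claim_equal_case5 := by
  intro p _
  unfold Spec_case5
  rw [case5_eq_winAny, case5_alt_eq]
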